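-- pv_equiv track=rewrite | github.com/keysaanadea/sop_hr_chatbot | backend/utils/text_utils.py | _number_to_indonesian_words
-- ===== SOURCE A (Python) =====
-- def _number_to_indonesian_words(value: int) -> str:
--     basic = [
--         "", "satu", "dua", "tiga", "empat", "lima",
--         "enam", "tujuh", "delapan", "sembilan", "sepuluh", "sebelas"
--     ]
--
--     if value < 12:
--         return basic[value]
--     if value < 20:
--         return f"{_number_to_indonesian_words(value - 10)} belas"
--     if value < 100:
--         tens = value // 10
--         rest = value % 10
--         return f"{_number_to_indonesian_words(tens)} puluh" + (f" {_number_to_indonesian_words(rest)}" if rest else "")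
--     if value < 200:
--         return "seratus" + (f" {_number_to_indonesian_words(value - 100)}" if value > 100 else "")
--     if value < 1000:
--         hundreds = value // 100
--         rest = value % 100
--         return f"{_number_to_indonesian_words(hundreds)} ratus" + (f" {_number_to_indonesian_words(rest)}" if rest else "")
--     if value < 2000:
--         return "seribu" + (f" {_number_to_indonesian_words(value - 1000)}" if value > 1000 else "")
--     if value < 1_000_000:
--         thousands = value // 1000
--         rest = value % 1000
--         return f"{_number_to_indonesian_words(thousands)} ribu" + (f" {_number_to_indonesian_words(rest)}" if rest else "")
--     if value < 1_000_000_000: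
--         millions = value // 1_000_000
--         rest = value % 1_000_000
--         return f"{_number_to_indonesian_words(millions)} juta" + (f" {_number_to_indonesian_words(rest)}" if rest else "")
--     if value < 1_000_000_000_000:
--         billions = value // 1_000_000_000
--         rest = value % 1_000_000_000
--         return f"{_number_to_indonesian_words(billions)} miliar" + (f" {_number_to_indonesian_words(rest)}" if rest else "")
--     trillions = value // 1_000_000_000_000
--     rest = value % 1_000_000_000_000
--     return f"{_number_to_indonesian_words(trillions)} triliun" + (f" {_number_to_indonesian_words(rest)}" if rest else "")
-- ===== SOURCE B (Python) =====
-- _BASIC = [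
--     "", "satu", "dua", "tiga", "empat", "lima",
--     "enam", "tujuh", "delapan", "sembilan", "sepuluh", "sebelas"
-- ]
--
-- _SCALES = [
--     (10 ** 12, "triliun"),
--     (10 ** 9, "miliar"),
--     (10 ** 6, "juta"),
--     (10 ** 3, "ribu"),
-- ]
--
--
-- def _words_under_1000(n: int) -> str:
--     """Spell a value below one thousand in Indonesian."""
--     if n < 12:
--         return _BASIC[n]
--     if n < 20:
--         return _BASIC[n - 10] + " belas"
--     if n < 100:
--         tail = _words_under_1000(n % 10)
--         return _BASIC[n // 10] + " puluh" + (" " + tail if tail else "")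
--     head = "seratus" if n < 200 else _BASIC[n // 100] + " ratus"
--     tail = _words_under_1000(n % 100)
--     return head + (" " + tail if tail else "")
--
--
-- def _number_to_indonesian_words(value: int) -> str:
--     if value < 12:
--         return _BASIC[value]
--     parts = []
--     for scale, name in _SCALES:
--         q, value = divmod(value, scale)
--         if q:
--             if scale == 1000 and q == 1:
--                 parts.append("seribu")
--             else:
--                 parts.append(_number_to_indonesian_words(q) + " " + name)
--     if value:
--         parts.append(_words_under_1000(value))
--     return " ".join(parts)
-- ===== Notes on version B (the rewrite author's own statement) =====
-- stated objective: simpler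
-- what changed: A's nine-branch cascading recursion is replaced by a sub-thousand helper plus one loop over a scale table (triliun/miliar/juta/ribu) that collects divmod quotient phrases and joins the non-empty parts with spaces.
-- outside the precondition, e.g. on _number_to_indonesian_words(-13): A raises IndexError, B raises IndexError
import Mathlib
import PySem

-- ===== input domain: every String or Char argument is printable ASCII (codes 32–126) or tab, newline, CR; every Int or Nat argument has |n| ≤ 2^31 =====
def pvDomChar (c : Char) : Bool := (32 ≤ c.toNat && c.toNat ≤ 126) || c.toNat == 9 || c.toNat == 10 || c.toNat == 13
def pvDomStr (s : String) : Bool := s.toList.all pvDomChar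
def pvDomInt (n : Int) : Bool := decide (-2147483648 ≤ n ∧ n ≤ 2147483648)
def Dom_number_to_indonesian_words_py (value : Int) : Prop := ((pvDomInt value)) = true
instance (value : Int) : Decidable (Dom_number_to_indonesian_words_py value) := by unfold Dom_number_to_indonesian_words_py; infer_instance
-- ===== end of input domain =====

-- B replaces A's nine-branch cascading recursion by a sub-thousand helper plus a single
-- loop over a scale table (triliun/miliar/juta/ribu) joining the non-empty parts;
-- objective: simpler. Return value only; neither program mutates anything.

-- ===== PORT A =====
-- tiny named facts cited by the ports' `decreasing_by` (keeps the proof terms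
-- embedded in the definitions small)
lemma pvSubLt (v a : Int) (h0 : 0 < a) (h1 : a ≤ v) : (v - a).toNat < v.toNat := by omega

lemma pvFdLt (v d : Int) (hd : 1 < d) (hv : 1 ≤ v) : (PySem.Int.floordiv v d).toNat < v.toNat := by
  have h1 : PySem.Int.floordiv v d < v := by
    rw [PySem.Int.floordiv_lt_iff_lt_mul (by omega)]
    have := mul_lt_mul_of_pos_left hd (show (0 : Int) < v by omega)
    simpa using this
  have h2 : 0 ≤ PySem.Int.floordiv v d := by
    rw [PySem.Int.le_floordiv_iff_mul_le (by omega)]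
    simpa using (show (0 : Int) ≤ v by omega)
  omega

lemma pvModLt (v d : Int) (hd : 0 < d) (hv : d ≤ v) : (PySem.Int.mod v d).toNat < v.toNat := by
  have h1 := PySem.Int.mod_nonneg (a := v) (b := d) hd
  have h2 := PySem.Int.mod_lt (a := v) (b := d) hd
  omega

-- A's `basic` list.
def pyBasic : List String :=
  ["", "satu", "dua", "tiga", "empat", "lima",
   "enam", "tujuh", "delapan", "sembilan", "sepuluh", "sebelas"]

-- Literal port of A.  `basic[value]` is `pyGet?` (negative indices wrap; for
-- value ≤ -13 Python raises IndexError — those inputs are outside Pre_, `.getD ""`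
-- is never reached there inside Pre_).
def number_to_indonesian_words_py (value : Int) : String :=
  if value < 12 then (PySem.List.pyGet? pyBasic value).getD ""
  else if value < 20 then
    number_to_indonesian_words_py (value - 10) ++ " belas"
  else if value < 100 then
    let tens := PySem.Int.floordiv value 10
    let rest := PySem.Int.mod value 10
    number_to_indonesian_words_py tens ++ " puluh" ++
      (if rest ≠ 0 then " " ++ number_to_indonesian_words_py rest else "")
  else if value < 200 then
    "seratus" ++ (if value > 100 then " " ++ number_to_indonesian_words_py (value - 100) else "")
  else if value < 1000 then
    let hundreds := PySem.Int.floordiv value 100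
    let rest := PySem.Int.mod value 100
    number_to_indonesian_words_py hundreds ++ " ratus" ++
      (if rest ≠ 0 then " " ++ number_to_indonesian_words_py rest else "")
  else if value < 2000 then
    "seribu" ++ (if value > 1000 then " " ++ number_to_indonesian_words_py (value - 1000) else "")
  else if value < 1000000 then
    let thousands := PySem.Int.floordiv value 1000
    let rest := PySem.Int.mod value 1000
    number_to_indonesian_words_py thousands ++ " ribu" ++
      (if rest ≠ 0 then " " ++ number_to_indonesian_words_py rest else "")
  else if value < 1000000000 then
    let millions := PySem.Int.floordiv value 1000000
    let rest := PySem.Int.mod value 1000000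
    number_to_indonesian_words_py millions ++ " juta" ++
      (if rest ≠ 0 then " " ++ number_to_indonesian_words_py rest else "")
  else if value < 1000000000000 then
    let billions := PySem.Int.floordiv value 1000000000
    let rest := PySem.Int.mod value 1000000000
    number_to_indonesian_words_py billions ++ " miliar" ++
      (if rest ≠ 0 then " " ++ number_to_indonesian_words_py rest else "")
  else
    let trillions := PySem.Int.floordiv value 1000000000000
    let rest := PySem.Int.mod value 1000000000000
    number_to_indonesian_words_py trillions ++ " triliun" ++
      (if rest ≠ 0 then " " ++ number_to_indonesian_words_py rest else "")
termination_by value.toNat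
decreasing_by
  all_goals first
    | exact pvSubLt _ _ (by norm_num) (by omega)
    | exact pvFdLt _ _ (by norm_num) (by omega)
    | exact pvModLt _ _ (by norm_num) (by omega)

-- ===== PORT B =====
-- B's `_BASIC` list (Source B).
def altBasic : List String :=
  ["", "satu", "dua", "tiga", "empat", "lima",
   "enam", "tujuh", "delapan", "sembilan", "sepuluh", "sebelas"]

-- B's `_SCALES` table.
def altScales : List (Int × String) :=
  [(1000000000000, "triliun"), (1000000000, "miliar"), (1000000, "juta"), (1000, "ribu")]

-- B's `_words_under_1000` helper.
def altWords1000 (n : Int) : String :=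
  if n < 12 then (PySem.List.pyGet? altBasic n).getD ""
  else if n < 20 then (PySem.List.pyGet? altBasic (n - 10)).getD "" ++ " belas"
  else if n < 100 then
    let tail := altWords1000 (PySem.Int.mod n 10)
    (PySem.List.pyGet? altBasic (PySem.Int.floordiv n 10)).getD "" ++ " puluh" ++
      (if tail ≠ "" then " " ++ tail else "")
  else
    let head := if n < 200 then "seratus"
      else (PySem.List.pyGet? altBasic (PySem.Int.floordiv n 100)).getD "" ++ " ratus"
    let tail := altWords1000 (PySem.Int.mod n 100)
    head ++ (if tail ≠ "" then " " ++ tail else "")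
termination_by n.toNat
decreasing_by
  all_goals first
    | exact pvSubLt _ _ (by norm_num) (by omega)
    | exact pvFdLt _ _ (by norm_num) (by omega)
    | exact pvModLt _ _ (by norm_num) (by omega)

-- B's main loop and its recursive call, fuel-indexed only to make the mutual
-- recursion structurally terminating (the fuel is always sufficient).
mutual
def altGo : Nat → Int → String
  | 0, _ => ""    -- never reached: fuel is always sufficient
  | f + 1, v =>
    if v < 12 then (PySem.List.pyGet? altBasic v).getD ""
    else PySem.Str.join " " (altGoParts f altScales v)
  termination_by f _ => (f, 0)
  decreasing_by
    simp_wf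
    apply Prod.Lex.left; omega
def altGoParts : Nat → List (Int × String) → Int → List String
  | _, [], v => if v ≠ 0 then [altWords1000 v] else []
  | f, (s, name) :: t, v =>
    let q := PySem.Int.floordiv v s
    let r := PySem.Int.mod v s
    (if q ≠ 0 then [if s = 1000 ∧ q = 1 then "seribu" else altGo f q ++ " " ++ name] else [])
      ++ altGoParts f t r
  termination_by f t _ => (f, t.length + 1)
  decreasing_by
    all_goals simp_wf
    all_goals first
      | (apply Prod.Lex.left; omega)
      | (apply Prod.Lex.right; simp [List.length_cons])
      | (apply Prod.Lex.right; omega)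
end

def number_to_indonesian_words_py_alt (value : Int) : String :=
  altGo (value.toNat + 1) value

-- ===== PRECONDITION & SPEC =====
-- Pre_ excludes exactly value ≤ -13, where A's `basic[value]` raises IndexError
-- (and B's same guard line raises identically).
def Pre_number_to_indonesian_words_py (value : Int) : Prop := -12 ≤ value
instance (value : Int) : Decidable (Pre_number_to_indonesian_words_py value) := by
  unfold Pre_number_to_indonesian_words_py; infer_instance

def pvWitness_number_to_indonesian_words_py : Int := 1234

def Spec_number_to_indonesian_words_py (value : Int) (out : String) : Prop := out = number_to_indonesian_words_py_alt value
instance (value : Int) (out : String) : Decidable (Spec_number_to_indonesian_words_py value out) := by unfold Spec_number_to_indonesian_words_py; infer_instance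

-- ===== CLAIM (what is proved, stated in full; the proofs are below) =====
def Claim_equal_number_to_indonesian_words_py : Prop := ∀ (value : Int), Dom_number_to_indonesian_words_py value → Pre_number_to_indonesian_words_py value → Spec_number_to_indonesian_words_py value (number_to_indonesian_words_py value)

-- ===== LEMMAS AND PROOFS =====

-- behaviour of " ".join on the shapes the loop produces
lemma sj_single (x : String) : PySem.Str.join " " [x] = x := by
  rw [← String.toList_inj]
  simp [PySem.Str.join, PySem.Chars.join, List.intercalate]

lemma sj_cons_cons (x y : String) (t : List String) :
    PySem.Str.join " " (x :: y :: t) = x ++ " " ++ PySem.Str.join " " (y :: t) := by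
  rw [← String.toList_inj]
  simp [PySem.Str.join, PySem.Chars.join, List.intercalate]

lemma sj_cons_ne (x : String) (l : List String) (h : l ≠ []) :
    PySem.Str.join " " (x :: l) = x ++ " " ++ PySem.Str.join " " l := by
  cases l with
  | nil => exact absurd rfl h
  | cons y t => exact sj_cons_cons x y t

-- non-emptiness of appended strings
lemma append_ne_empty_right (a b : String) (h : b ≠ "") : a ++ b ≠ "" := by
  intro h2
  rw [← String.toList_inj] at h2
  simp at h2
  exact h (by rw [← String.toList_inj]; simp [h2.2])

lemma append_ne_empty_left (a c : String) (h : a ≠ "") : a ++ c ≠ "" := by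
  intro h2
  rw [← String.toList_inj] at h2
  simp at h2
  exact h (by rw [← String.toList_inj]; simp [h2.1])

lemma append3_ne (a b c : String) (hb : b ≠ "") : a ++ b ++ c ≠ "" :=
  append_ne_empty_left _ _ (append_ne_empty_right _ _ hb)

-- the shared word list
lemma basic_eq : pyBasic = altBasic := rfl

lemma lookup_ne (r : Int) (h1 : 1 ≤ r) (h2 : r < 12) : (PySem.List.pyGet? altBasic r).getD "" ≠ "" := by
  interval_cases r <;> decide

lemma lookup_zero : (PySem.List.pyGet? altBasic 0).getD "" = "" := by decide

-- B's helper never returns "" on 1 ≤ v < 1000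
lemma altWords1000_ne_empty (v : Int) (h0 : 0 < v) (h1 : v < 1000) : altWords1000 v ≠ "" := by
  rw [altWords1000]
  by_cases h12 : v < 12
  · rw [if_pos h12]; exact lookup_ne v (by omega) h12
  · rw [if_neg h12]
    by_cases h20 : v < 20
    · rw [if_pos h20]; exact append_ne_empty_right _ _ (by decide)
    · rw [if_neg h20]
      by_cases h100 : v < 100
      · rw [if_pos h100]; exact append3_ne _ _ _ (by decide)
      · rw [if_neg h100]
        by_cases h200 : v < 200
        · rw [if_pos h200]; exact append_ne_empty_left _ _ (by decide)
        · rw [if_neg h200]; exact append_ne_empty_left _ _ (append_ne_empty_right _ _ (by decide))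

-- A agrees with B's sub-thousand helper
lemma A_eq_words1000_aux : ∀ (n : Nat) (v : Int), v.toNat < n → 0 ≤ v → v < 1000 →
    number_to_indonesian_words_py v = altWords1000 v := by
  intro n
  induction n with
  | zero => intro v hv h0 h1; omega
  | succ n ih =>
    intro v hv h0 h1
    rw [number_to_indonesian_words_py, altWords1000]
    by_cases h12 : v < 12
    · rw [if_pos h12, if_pos h12, basic_eq]
    by_cases h20 : v < 20
    · rw [if_neg h12, if_pos h20, if_neg h12, if_pos h20]
      rw [number_to_indonesian_words_py, if_pos (show v - 10 < 12 by omega), basic_eq]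
    by_cases h100 : v < 100
    · have hfd : PySem.Int.floordiv v 10 = v / 10 := PySem.Int.floordiv_eq_ediv_of_pos (by norm_num)
      have hmd : PySem.Int.mod v 10 = v % 10 := PySem.Int.mod_eq_emod_of_pos (by norm_num)
      simp only [if_neg h12, if_neg h20, if_pos h100, hfd, hmd]
      rw [show altWords1000 (v % 10) = (PySem.List.pyGet? altBasic (v % 10)).getD "" from by
        rw [altWords1000, if_pos (show v % 10 < 12 by omega)]]
      rw [show number_to_indonesian_words_py (v / 10) = (PySem.List.pyGet? pyBasic (v / 10)).getD "" from by
        rw [number_to_indonesian_words_py, if_pos (show v / 10 < 12 by omega)]]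
      rw [show number_to_indonesian_words_py (v % 10) = (PySem.List.pyGet? pyBasic (v % 10)).getD "" from by
        rw [number_to_indonesian_words_py, if_pos (show v % 10 < 12 by omega)]]
      rw [basic_eq]
      congr 1
      by_cases hr : v % 10 = 0
      · rw [hr, lookup_zero]; simp
      · rw [if_pos (show v % 10 ≠ 0 from hr), if_pos (lookup_ne _ (by omega) (by omega))]
    by_cases h200 : v < 200
    · have hmd : PySem.Int.mod v 100 = v - 100 := by
        rw [PySem.Int.mod_eq_emod_of_pos (by norm_num)]; omega
      simp only [if_neg h12, if_neg h20, if_neg h100, if_pos h200, hmd]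
      rw [ih (v - 100) (by omega) (by omega) (by omega)]
      congr 1
      by_cases hr : v - 100 = 0
      · rw [hr]
        rw [show altWords1000 0 = "" from by rw [altWords1000, if_pos (by norm_num)]; exact lookup_zero]
        simp
        omega
      · rw [if_pos (show v > 100 by omega), if_pos (altWords1000_ne_empty _ (by omega) (by omega))]
    · have hfd : PySem.Int.floordiv v 100 = v / 100 := PySem.Int.floordiv_eq_ediv_of_pos (by norm_num)
      have hmd : PySem.Int.mod v 100 = v % 100 := PySem.Int.mod_eq_emod_of_pos (by norm_num)
      simp only [if_neg h12, if_neg h20, if_neg h100, if_neg h200, if_pos h1, hfd, hmd]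
      rw [show number_to_indonesian_words_py (v / 100) = (PySem.List.pyGet? pyBasic (v / 100)).getD "" from by
        rw [number_to_indonesian_words_py, if_pos (show v / 100 < 12 by omega)]]
      rw [ih (v % 100) (by omega) (by omega) (by omega), basic_eq]
      congr 1
      by_cases hr : v % 100 = 0
      · rw [hr]
        rw [show altWords1000 0 = "" from by rw [altWords1000, if_pos (by norm_num)]; exact lookup_zero]
        simp
      · rw [if_pos (show v % 100 ≠ 0 from hr), if_pos (altWords1000_ne_empty _ (by omega) (by omega))]

lemma A_eq_words1000 (v : Int) (h0 : 0 ≤ v) (h1 : v < 1000) :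
    number_to_indonesian_words_py v = altWords1000 v :=
  A_eq_words1000_aux (v.toNat + 1) v (by omega) h0 h1

-- B's recursive call on a scale quotient < 1000 needs only one unit of fuel
lemma altGo_small (f : Nat) (v : Int) (h0 : 0 ≤ v) (h1 : v < 1000) :
    altGo (f + 1) v = altWords1000 v := by
  rw [altGo]
  by_cases h12 : v < 12
  · rw [if_pos h12, altWords1000, if_pos h12]
  · rw [if_neg h12]
    have e12 : PySem.Int.floordiv v 1000000000000 = 0 := by
      rw [PySem.Int.floordiv_eq_ediv_of_pos (by norm_num)]; omega
    have m12 : PySem.Int.mod v 1000000000000 = v := by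
      rw [PySem.Int.mod_eq_emod_of_pos (by norm_num)]; omega
    have e9 : PySem.Int.floordiv v 1000000000 = 0 := by
      rw [PySem.Int.floordiv_eq_ediv_of_pos (by norm_num)]; omega
    have m9 : PySem.Int.mod v 1000000000 = v := by
      rw [PySem.Int.mod_eq_emod_of_pos (by norm_num)]; omega
    have e6 : PySem.Int.floordiv v 1000000 = 0 := by
      rw [PySem.Int.floordiv_eq_ediv_of_pos (by norm_num)]; omega
    have m6 : PySem.Int.mod v 1000000 = v := by
      rw [PySem.Int.mod_eq_emod_of_pos (by norm_num)]; omega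
    have e3 : PySem.Int.floordiv v 1000 = 0 := by
      rw [PySem.Int.floordiv_eq_ediv_of_pos (by norm_num)]; omega
    have m3 : PySem.Int.mod v 1000 = v := by
      rw [PySem.Int.mod_eq_emod_of_pos (by norm_num)]; omega
    simp only [altScales, altGoParts, e12, m12, e9, m9, e6, m6, e3, m3, ne_eq,
      not_true_eq_false, ite_false, List.nil_append]
    rw [if_pos (show ¬ v = 0 by omega), sj_single]

-- the loop yields no parts for remainder 0
lemma altGoParts_zero (f : Nat) : ∀ t : List (Int × String), (∀ p ∈ t, 0 < p.1) →
    altGoParts f t 0 = [] := by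
  intro t
  induction t with
  | nil => intro _; rw [altGoParts]; simp
  | cons x t ih =>
    intro h
    obtain ⟨s, name⟩ := x
    have hs : 0 < s := h (s, name) (by simp)
    have e0 : PySem.Int.floordiv 0 s = 0 := by
      rw [PySem.Int.floordiv_eq_ediv_of_pos hs]; simp
    have m0 : PySem.Int.mod 0 s = 0 := by
      rw [PySem.Int.mod_eq_emod_of_pos hs]; simp
    rw [altGoParts]
    simp only [e0, m0, ne_eq, not_true_eq_false, ite_false, List.nil_append]
    exact ih (fun p hp => h p (by simp [hp]))

-- the loop yields at least one part for a positive remainder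
lemma altGoParts_ne_nil (f : Nat) : ∀ t : List (Int × String), (∀ p ∈ t, 0 < p.1) →
    ∀ rem : Int, 0 < rem → altGoParts f t rem ≠ [] := by
  intro t
  induction t with
  | nil => intro _ rem hrem; rw [altGoParts]; simp [show rem ≠ 0 by omega]
  | cons x t ih =>
    intro h rem hrem
    obtain ⟨s, name⟩ := x
    have hs : 0 < s := h (s, name) (by simp)
    rw [altGoParts]
    by_cases hq : PySem.Int.floordiv rem s = 0
    · have hm : PySem.Int.mod rem s = rem := by
        have h2 := PySem.Int.floordiv_mul_add_mod rem s
        rw [hq] at h2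
        simpa using h2
      simp only [hq, hm, ne_eq, not_true_eq_false, ite_false, List.nil_append]
      exact ih (fun p hp => h p (by simp [hp])) rem hrem
    · simp [hq]

-- join of the loop's parts = A, level by level up the scale table
lemma lvl_nil (f : Nat) (r : Int) (h0 : 0 < r) (h1 : r < 1000) :
    PySem.Str.join " " (altGoParts f [] r) = number_to_indonesian_words_py r := by
  rw [altGoParts, if_pos (show r ≠ 0 by omega), sj_single]
  exact (A_eq_words1000 r (by omega) h1).symm

lemma lvl_ribu (f : Nat) (r : Int) (h0 : 0 < r) (h1 : r < 1000000) :
    PySem.Str.join " " (altGoParts (f + 1) [(1000, "ribu")] r) = number_to_indonesian_words_py r := by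
  have hfd : PySem.Int.floordiv r 1000 = r / 1000 := PySem.Int.floordiv_eq_ediv_of_pos (by norm_num)
  have hmd : PySem.Int.mod r 1000 = r % 1000 := PySem.Int.mod_eq_emod_of_pos (by norm_num)
  rw [altGoParts]
  simp only [hfd, hmd]
  by_cases hsmall : r < 1000
  · have : r / 1000 = 0 := by omega
    have hm : r % 1000 = r := by omega
    simp only [this, hm, ne_eq, not_true_eq_false, ite_false, List.nil_append]
    exact lvl_nil (f + 1) r h0 hsmall
  · have hq1 : 1 ≤ r / 1000 := by omega
    rw [if_pos (show r / 1000 ≠ 0 by omega)]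
    by_cases h2000 : r < 2000
    · have hq : r / 1000 = 1 := by omega
      have hm : r % 1000 = r - 1000 := by omega
      rw [hq, hm, if_pos (show True ∧ (1 : Int) = 1 from ⟨trivial, rfl⟩)]
      rw [number_to_indonesian_words_py]
      simp only [if_neg (show ¬ r < 12 by omega), if_neg (show ¬ r < 20 by omega),
        if_neg (show ¬ r < 100 by omega), if_neg (show ¬ r < 200 by omega),
        if_neg (show ¬ r < 1000 by omega), if_pos h2000]
      by_cases hrem : r - 1000 = 0
      · rw [hrem, altGoParts_zero (f + 1) [] (by simp), List.append_nil,
          if_neg (show ¬ r > 1000 by omega), sj_single]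
        rw [← String.toList_inj]; simp
      · rw [List.singleton_append, sj_cons_ne _ _ (altGoParts_ne_nil (f + 1) [] (by simp) _ (by omega)),
          lvl_nil (f + 1) (r - 1000) (by omega) (by omega), if_pos (show r > 1000 by omega)]
        rw [← String.toList_inj]; simp
    · -- 2000 ≤ r < 10^6 : quotient ≥ 2
      have hq : ¬ (True ∧ r / 1000 = 1) := by rintro ⟨-, h⟩; omega
      rw [if_neg hq, number_to_indonesian_words_py]
      simp only [if_neg (show ¬ r < 12 by omega), if_neg (show ¬ r < 20 by omega),
        if_neg (show ¬ r < 100 by omega), if_neg (show ¬ r < 200 by omega),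
        if_neg (show ¬ r < 1000 by omega), if_neg (show ¬ r < 2000 by omega),
        if_pos (show r < 1000000 from h1), hfd, hmd]
      rw [altGo_small f (r / 1000) (by omega) (by omega),
        A_eq_words1000 (r / 1000) (by omega) (by omega)]
      by_cases hrem : r % 1000 = 0
      · rw [hrem, altGoParts_zero (f + 1) [] (by simp), List.append_nil, sj_single,
          if_neg (show ¬ (0 : Int) ≠ 0 by simp)]
        rw [← String.toList_inj]; simp
      · rw [List.singleton_append, sj_cons_ne _ _ (altGoParts_ne_nil (f + 1) [] (by simp) _ (by omega)),
          lvl_nil (f + 1) (r % 1000) (by omega) (by omega), if_pos (show r % 1000 ≠ 0 from hrem)]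
        rw [← String.toList_inj]; simp

lemma lvl_juta (f : Nat) (r : Int) (h0 : 0 < r) (h1 : r < 1000000000) :
    PySem.Str.join " " (altGoParts (f + 1) [(1000000, "juta"), (1000, "ribu")] r) = number_to_indonesian_words_py r := by
  have hfd : PySem.Int.floordiv r 1000000 = r / 1000000 := PySem.Int.floordiv_eq_ediv_of_pos (by norm_num)
  have hmd : PySem.Int.mod r 1000000 = r % 1000000 := PySem.Int.mod_eq_emod_of_pos (by norm_num)
  rw [altGoParts]
  simp only [hfd, hmd]
  by_cases hsmall : r < 1000000
  · have : r / 1000000 = 0 := by omega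
    have hm : r % 1000000 = r := by omega
    simp only [this, hm, ne_eq, not_true_eq_false, ite_false, List.nil_append]
    exact lvl_ribu f r h0 hsmall
  · have hq1 : 1 ≤ r / 1000000 := by omega
    rw [if_pos (show r / 1000000 ≠ 0 by omega),
      if_neg (show ¬ ((1000000 : Int) = 1000 ∧ r / 1000000 = 1) by rintro ⟨h, -⟩; norm_num at h),
      number_to_indonesian_words_py]
    simp only [if_neg (show ¬ r < 12 by omega), if_neg (show ¬ r < 20 by omega),
      if_neg (show ¬ r < 100 by omega), if_neg (show ¬ r < 200 by omega),
      if_neg (show ¬ r < 1000 by omega), if_neg (show ¬ r < 2000 by omega),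
      if_neg (show ¬ r < 1000000 by omega), if_pos (show r < 1000000000 from h1), hfd, hmd]
    rw [altGo_small f (r / 1000000) (by omega) (by omega),
      A_eq_words1000 (r / 1000000) (by omega) (by omega)]
    by_cases hrem : r % 1000000 = 0
    · rw [hrem, altGoParts_zero (f + 1) [(1000, "ribu")] (by norm_num), List.append_nil, sj_single,
        if_neg (show ¬ (0 : Int) ≠ 0 by simp)]
      rw [← String.toList_inj]; simp
    · rw [List.singleton_append,
        sj_cons_ne _ _ (altGoParts_ne_nil (f + 1) [(1000, "ribu")] (by norm_num) _ (by omega)),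
        lvl_ribu f (r % 1000000) (by omega) (by omega), if_pos (show r % 1000000 ≠ 0 from hrem)]
      rw [← String.toList_inj]; simp

lemma lvl_miliar (f : Nat) (r : Int) (h0 : 0 < r) (h1 : r < 1000000000000) :
    PySem.Str.join " " (altGoParts (f + 1) [(1000000000, "miliar"), (1000000, "juta"), (1000, "ribu")] r) = number_to_indonesian_words_py r := by
  have hfd : PySem.Int.floordiv r 1000000000 = r / 1000000000 := PySem.Int.floordiv_eq_ediv_of_pos (by norm_num)
  have hmd : PySem.Int.mod r 1000000000 = r % 1000000000 := PySem.Int.mod_eq_emod_of_pos (by norm_num)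
  rw [altGoParts]
  simp only [hfd, hmd]
  by_cases hsmall : r < 1000000000
  · have : r / 1000000000 = 0 := by omega
    have hm : r % 1000000000 = r := by omega
    simp only [this, hm, ne_eq, not_true_eq_false, ite_false, List.nil_append]
    exact lvl_juta f r h0 hsmall
  · have hq1 : 1 ≤ r / 1000000000 := by omega
    rw [if_pos (show r / 1000000000 ≠ 0 by omega),
      if_neg (show ¬ ((1000000000 : Int) = 1000 ∧ r / 1000000000 = 1) by rintro ⟨h, -⟩; norm_num at h),
      number_to_indonesian_words_py]
    simp only [if_neg (show ¬ r < 12 by omega), if_neg (show ¬ r < 20 by omega),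
      if_neg (show ¬ r < 100 by omega), if_neg (show ¬ r < 200 by omega),
      if_neg (show ¬ r < 1000 by omega), if_neg (show ¬ r < 2000 by omega),
      if_neg (show ¬ r < 1000000 by omega), if_neg (show ¬ r < 1000000000 by omega),
      if_pos (show r < 1000000000000 from h1), hfd, hmd]
    rw [altGo_small f (r / 1000000000) (by omega) (by omega),
      A_eq_words1000 (r / 1000000000) (by omega) (by omega)]
    by_cases hrem : r % 1000000000 = 0
    · rw [hrem, altGoParts_zero (f + 1) [(1000000, "juta"), (1000, "ribu")] (by norm_num),
        List.append_nil, sj_single, if_neg (show ¬ (0 : Int) ≠ 0 by simp)]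
      rw [← String.toList_inj]; simp
    · rw [List.singleton_append,
        sj_cons_ne _ _ (altGoParts_ne_nil (f + 1) [(1000000, "juta"), (1000, "ribu")] (by norm_num) _ (by omega)),
        lvl_juta f (r % 1000000000) (by omega) (by omega), if_pos (show r % 1000000000 ≠ 0 from hrem)]
      rw [← String.toList_inj]; simp

-- ===== VERDICT (by name: the statement is the Claim_ definition above) =====
theorem number_to_indonesian_words_py_spec : Claim_equal_number_to_indonesian_words_py := by
  intro v hdom hpre
  unfold Spec_number_to_indonesian_words_py number_to_indonesian_words_py_alt
  have hb : -2147483648 ≤ v ∧ v ≤ 2147483648 := by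
    have := hdom
    unfold Dom_number_to_indonesian_words_py pvDomInt at this
    exact of_decide_eq_true this
  have hpre' : -12 ≤ v := hpre
  by_cases h12 : v < 12
  · rw [number_to_indonesian_words_py, if_pos h12, altGo, if_pos h12, basic_eq]
  · obtain ⟨f, hf⟩ : ∃ f, v.toNat + 1 = f + 1 + 1 := ⟨v.toNat - 1, by omega⟩
    rw [hf, altGo, if_neg h12]
    have e12 : PySem.Int.floordiv v 1000000000000 = 0 := by
      rw [PySem.Int.floordiv_eq_ediv_of_pos (by norm_num)]; omega
    have m12 : PySem.Int.mod v 1000000000000 = v := by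
      rw [PySem.Int.mod_eq_emod_of_pos (by norm_num)]; omega
    rw [altScales, altGoParts]
    simp only [e12, m12, ne_eq, not_true_eq_false, ite_false, List.nil_append]
    exact (lvl_miliar f v (by omega) (by omega)).symm
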